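-- pv_equiv track=rewrite | github.com/TheinThanHlan/GeneralPosForStores | docs/MenuDataParser_forDrink.py | split_join_print
-- ===== SOURCE A (Python) =====
-- def split_join_print(insert_stmt,arr):
--     output=""
--     sepreator="--#-#"
--     count=0
--     tmp_arr=[]
--     for a in arr:
--         if count>400:
--             output+=insert_stmt+"\n"
--             output+=",".join(tmp_arr)+"\n"
--             output+=sepreator+"\n"
--
--             count=0
--             tmp_arr=[]
--
--         tmp_arr.append(a);
--         count+=1
--     output+=insert_stmt+"\n"
--     output+=",".join(tmp_arr)+"\n"
--     output+=sepreator+"\n"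
--     return output
-- ===== SOURCE B (Python) =====
-- def split_join_print(insert_stmt, arr):
--     items = list(arr)
--     output = ""
--     for i in range(0, len(items), 401):
--         output += insert_stmt + "\n"
--         output += ",".join(items[i:i+401]) + "\n"
--         output += "--#-#" + "\n"
--     if not items:
--         output = insert_stmt + "\n" + "\n" + "--#-#" + "\n"
--     return output
-- ===== Notes on version B (the rewrite author's own statement) =====
-- stated objective: simpler
-- what changed: Replaces A's per-element counter/flush loop (mutable count and tmp_arr with a mid-iteration flush branch) with a for-loop over range(0, len(items), 401) that emits one block per slice items[i:i+401], plus an explicit empty-input block.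
import Mathlib
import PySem

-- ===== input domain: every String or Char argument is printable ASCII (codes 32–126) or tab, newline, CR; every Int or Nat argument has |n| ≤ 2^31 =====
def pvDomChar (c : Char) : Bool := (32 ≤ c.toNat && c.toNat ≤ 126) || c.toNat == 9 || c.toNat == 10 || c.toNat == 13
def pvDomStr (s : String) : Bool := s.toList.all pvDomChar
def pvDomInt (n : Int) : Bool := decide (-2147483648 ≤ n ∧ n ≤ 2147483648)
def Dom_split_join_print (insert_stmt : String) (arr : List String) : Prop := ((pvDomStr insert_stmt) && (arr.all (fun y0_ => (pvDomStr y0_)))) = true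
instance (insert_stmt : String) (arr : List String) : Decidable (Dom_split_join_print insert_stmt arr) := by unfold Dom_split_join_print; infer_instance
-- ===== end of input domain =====

-- B replaces A's per-element counter/flush loop by an index-stepping loop that emits one block per 401-element slice (simpler decomposition, same output).

-- ===== PORT A =====
-- A's for-loop over arr with state (output, count, tmp_arr); the flush branch runs before the element is appended.
def aLoop (insert_stmt : String) : List String → String → Int → List String → String
  | [], output, _, tmp_arr =>
      output ++ insert_stmt ++ "\n" ++ PySem.Str.join "," tmp_arr ++ "\n" ++ "--#-#" ++ "\n"
  | a :: rest, output, count, tmp_arr =>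
      if count > 400 then
        aLoop insert_stmt rest
          (output ++ insert_stmt ++ "\n" ++ PySem.Str.join "," tmp_arr ++ "\n" ++ "--#-#" ++ "\n")
          1 [a]
      else
        aLoop insert_stmt rest output (count + 1) (tmp_arr ++ [a])

def split_join_print (insert_stmt : String) (arr : List String) : String :=
  aLoop insert_stmt arr "" 0 []

-- ===== PORT B =====
-- B's for-loop over range(0, len(items), 401): one block per slice items[i:i+401];
-- the `if not items` branch reproduces the single block emitted for empty input.
def bBlock (insert_stmt : String) (items : List String) (output : String) (i : Int) : String :=
  output ++ insert_stmt ++ "\n" ++ PySem.Str.join "," (PySem.List.slice items (some i) (some (i + 401))) ++ "\n" ++ "--#-#" ++ "\n"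

def split_join_print_alt (insert_stmt : String) (arr : List String) : String :=
  let items := arr
  let output := (PySem.List.pyRange 0 (items.length : Int) 401).foldl (bBlock insert_stmt items) ""
  if items.isEmpty then insert_stmt ++ "\n" ++ "\n" ++ "--#-#" ++ "\n" else output

-- ===== PRECONDITION & SPEC =====
def Spec_split_join_print (insert_stmt : String) (arr : List String) (out : String) : Prop := out = split_join_print_alt insert_stmt arr
instance (insert_stmt : String) (arr : List String) (out : String) : Decidable (Spec_split_join_print insert_stmt arr out) := by unfold Spec_split_join_print; infer_instance

-- ===== CLAIM (what is proved, stated in full; the proofs are below) =====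
def Claim_equal_split_join_print : Prop := ∀ (insert_stmt : String) (arr : List String), Dom_split_join_print insert_stmt arr → Spec_split_join_print insert_stmt arr (split_join_print insert_stmt arr)

-- ===== LEMMAS AND PROOFS =====

-- Proof-side intermediary: take/drop chunking of the remaining items (the common shape of both loops).
def chunkLoop (insert_stmt : String) (items : List String) (output : String) : String :=
  if items.length > 401 then
    chunkLoop insert_stmt (items.drop 401)
      (output ++ insert_stmt ++ "\n" ++ PySem.Str.join "," (items.take 401) ++ "\n" ++ "--#-#" ++ "\n")
  else
    output ++ insert_stmt ++ "\n" ++ PySem.Str.join "," items ++ "\n" ++ "--#-#" ++ "\n"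
termination_by items.length
decreasing_by simp; omega

-- Invariant of A's loop: with count = |tmp| ≤ 401, the rest of A's run equals chunking tmp ++ arr.
theorem aLoop_eq_chunkLoop (ins : String) (arr : List String) :
    ∀ (out : String) (tmp : List String), tmp.length ≤ 401 →
      aLoop ins arr out (tmp.length : Int) tmp = chunkLoop ins (tmp ++ arr) out := by
  induction arr with
  | nil =>
      intro out tmp hle
      rw [aLoop, chunkLoop, if_neg (by simp; omega)]
      simp
  | cons a rest ih =>
      intro out tmp hle
      rw [aLoop]
      by_cases h : ((tmp.length : Int) > 400)
      · have h401 : tmp.length = 401 := by omega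
        rw [if_pos h]
        have h1 : (1 : Int) = (([a] : List String).length : Int) := by simp
        rw [h1, ih _ [a] (by simp)]
        conv_rhs => rw [chunkLoop]
        have hlen : (tmp ++ a :: rest).length > 401 := by simp; omega
        rw [if_pos hlen]
        have htake : (tmp ++ a :: rest).take 401 = tmp := by
          rw [← h401, List.take_left]
        have hdrop : (tmp ++ a :: rest).drop 401 = a :: rest := by
          rw [← h401, List.drop_left]
        rw [htake, hdrop]
        simp
      · rw [if_neg h]
        have h1 : (tmp.length : Int) + 1 = ((tmp ++ [a]).length : Int) := by simp
        rw [h1, ih _ (tmp ++ [a]) (by simp; omega)]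
        simp

-- pyRange decomposition for step 401.
theorem pyRange401_last (i n : Int) (h1 : i < n) (h2 : n ≤ i + 401) :
    PySem.List.pyRange i n 401 = [i] := by
  simp only [PySem.List.pyRange]
  norm_num
  have hc : ((n - i + 401 - 1) / 401).toNat = 1 := by omega
  simp [h1, hc, List.range_succ]

theorem pyRange401_cons (i n : Int) (h : i + 401 < n) :
    PySem.List.pyRange i n 401 = i :: PySem.List.pyRange (i + 401) n 401 := by
  simp only [PySem.List.pyRange]
  norm_num
  have h1 : i < n := by omega
  simp only [h1, h, if_pos]
  have hc : ((n - i + 401 - 1) / 401).toNat = ((n - (i + 401) + 401 - 1) / 401).toNat + 1 := by omega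
  rw [hc, List.range_succ_eq_map]
  simp [List.map_map, Function.comp]
  intro a _
  ring

-- B's fold from index i equals chunking of the items from i on (for i < length).
theorem bFold_eq_chunkLoop (ins : String) (items : List String) :
    ∀ (n i : Nat), items.length - i ≤ n → i < items.length → ∀ out,
      (PySem.List.pyRange (i : Int) (items.length : Int) 401).foldl (bBlock ins items) out =
        chunkLoop ins (items.drop i) out := by
  intro n
  induction n with
  | zero => intro i hn hi out; omega
  | succ n ih =>
      intro i hn hi out
      have hsl : PySem.List.slice items (some (i : Int)) (some ((i : Int) + 401)) =
          (items.drop i).take 401 := by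
        rw [PySem.List.slice_toNat _ (by positivity) (by positivity)]
        congr 1
        omega
      by_cases h : i + 401 < items.length
      · rw [pyRange401_cons _ _ (by omega), chunkLoop, if_pos (by simp; omega)]
        rw [List.foldl_cons]
        rw [show ((i : Int) + 401) = ((i + 401 : Nat) : Int) from by push_cast; ring]
        rw [ih (i + 401) (by omega) (by omega)]
        simp only [bBlock]
        rw [hsl, List.drop_drop]
      · rw [pyRange401_last _ _ (by omega) (by omega), chunkLoop, if_neg (by simp; omega)]
        rw [List.foldl_cons, List.foldl_nil]
        simp only [bBlock]
        rw [hsl, List.take_of_length_le (by simp; omega)]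

-- ===== VERDICT (by name: the statement is the Claim_ definition above) =====
theorem split_join_print_spec : Claim_equal_split_join_print := by
  intro ins arr _
  unfold Spec_split_join_print split_join_print split_join_print_alt
  have ha := aLoop_eq_chunkLoop ins arr "" [] (by simp)
  simp only [List.nil_append, List.length_nil, Nat.cast_zero] at ha
  rw [ha]
  by_cases he : arr = []
  · subst he
    rw [chunkLoop]
    simp [PySem.Str.join, PySem.Chars.join, List.intercalate]
  · have hb := bFold_eq_chunkLoop ins arr arr.length 0 (by omega)
      (by simpa [List.length_pos_iff] using he) ""
    simp only [Nat.cast_zero, List.drop_zero] at hb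
    simp [List.isEmpty_iff, he, hb]
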